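-- pv_equiv track=rewrite | github.com/gardiens/Braess-Paradox | SSP CONVEXE ( flux minimal avec  latence convexe en temps lineaire).py | imbalance
-- ===== SOURCE A (Python) =====
-- def recuperergrapheentrantsortant(graphecout):
--     """" Renvoi un graphe qui conteint des tuples avec (listedessommets qui va vers i , listedessommets qui sorts de i)"""
--     graphe={}
--     # Complexité en O(nombre arete + nombre sommet)
--     #Initialisation
--     for i in graphecout:
--         graphe[i]=[[],[]]
--
--
--     # On balaye toutes les arêtes pour obtenir le resultat
--     for i in graphecout:
--         for j in graphecout[i]:
--             graphe[j][0].append(i) # On rajoute l'entrée qui est i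
--             graphe[i][1].append(j) # La sortie
--     return graphe
--
-- def imbalance(flux,m,depart, arrivee ):
--     """" Renvoi le graphe qui contient l'imbalance  du graphe"""
--     # L'imbalance vaut  somme du flux qui rentre- somme  du flux qui sort pour ceux qui sont qui ne sont ni l'entrée ni la sortée
--     #  Sinon il vaut +- m + somme entrée - somme sortie  si c'est le depart ou l'arrivee
--     # C'est le déséquilibre du graphe
--     # Complexité O( nombre arête + nombre sommet)
--     graphe={}
--
--     # Initialisation du graphe
--     for i in flux:
--         if i ==arrivee:
--             graphe[i]=-m
--         elif i== depart:
--             graphe[i]= m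
--         else:
--             graphe[i]=0
--
--
--     grapheentrantsortant= recuperergrapheentrantsortant(flux)
--     for i in flux: # On regarde chaque somet du graphe
--         [entranti,sortanti]=grapheentrantsortant[i] # On récupère les sommets entrant et sortant
--         sommeentranti=0
--         sommesortanti=0 # On calcule séparément les sommes
--         for k in entranti:
--             sommeentranti+=flux[k][i]
--
--         for j in sortanti:
--             sommesortanti+=flux[i][j]
--
--         graphe[i]= graphe[i] + sommeentranti-sommesortanti
--     return graphe
-- ===== SOURCE B (Python) =====
-- def imbalance(flux, m, depart, arrivee):
--     """Single scatter pass over edges: no reverse-adjacency helper, no per-node re-summation."""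
--     graphe = {}
--     for i in flux:
--         if i == arrivee:
--             graphe[i] = -m
--         elif i == depart:
--             graphe[i] = m
--         else:
--             graphe[i] = 0
--     for i in flux:
--         for j in flux[i]:
--             f = flux[i][j]
--             graphe[i] = graphe[i] - f
--             graphe[j] = graphe[j] + f   # KeyError, like A, if j is not a node of flux
--     return graphe
-- ===== Notes on version B (the rewrite author's own statement) =====
-- stated objective: simpler
-- what changed: B drops A's reverse-adjacency helper and the per-node incoming/outgoing re-summation and instead does one scatter pass over the edges, subtracting each flow at its source and adding it at its target.
import Mathlib
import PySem

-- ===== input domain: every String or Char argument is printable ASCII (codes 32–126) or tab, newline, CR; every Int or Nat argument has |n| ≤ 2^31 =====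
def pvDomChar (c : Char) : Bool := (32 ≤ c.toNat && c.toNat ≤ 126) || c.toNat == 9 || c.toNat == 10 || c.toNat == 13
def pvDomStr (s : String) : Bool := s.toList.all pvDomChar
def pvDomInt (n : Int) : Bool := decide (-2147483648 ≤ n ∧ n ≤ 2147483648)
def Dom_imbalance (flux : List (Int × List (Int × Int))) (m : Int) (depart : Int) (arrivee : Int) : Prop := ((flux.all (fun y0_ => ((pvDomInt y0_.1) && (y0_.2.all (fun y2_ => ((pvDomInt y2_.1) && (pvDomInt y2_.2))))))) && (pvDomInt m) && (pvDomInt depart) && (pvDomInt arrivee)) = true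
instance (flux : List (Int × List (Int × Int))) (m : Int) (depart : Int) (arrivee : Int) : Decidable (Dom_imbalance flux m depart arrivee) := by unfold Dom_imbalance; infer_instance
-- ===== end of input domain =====

-- B replaces A's reverse-adjacency helper and per-node re-summation by a single scatter pass
-- over the edges (objective: simpler).

-- Shared readers of the dict-typed argument `flux` (association list, first-match lookup):
-- `for i in flux` iterates pvKeys, `flux[i]` is pvRow, `flux[i]`'s keys are pvRowKeys,
-- `flux[i][j]` is pvVal (its uses below are guarded: the key is always present).
def pvKeys (flux : List (Int × List (Int × Int))) : List Int :=
  PySem.List.dedup (flux.map (·.1))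

def pvRow (flux : List (Int × List (Int × Int))) (k : Int) : List (Int × Int) :=
  ((flux.find? (fun p => p.1 == k)).map (·.2)).getD []

def pvRowKeys (flux : List (Int × List (Int × Int))) (k : Int) : List Int :=
  PySem.List.dedup ((pvRow flux k).map (·.1))

def pvVal (flux : List (Int × List (Int × Int))) (i j : Int) : Int :=
  (((pvRow flux i).find? (fun p => p.1 == j)).map (·.2)).getD 0

-- The initialisation loop (identical source text in A and in B): +m at depart, -m at arrivee.
def pvInit (flux : List (Int × List (Int × Int))) (m depart arrivee : Int) :
    PySem.Dict Int Int :=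
  (pvKeys flux).foldl (fun g i =>
    if i = arrivee then g.insert i (-m)
    else if i = depart then g.insert i m
    else g.insert i 0) PySem.Dict.empty

-- ===== PORT A =====
-- Python raises KeyError on `graphe[j][0].append(i)` when j is not a key of flux; the port's
-- `modify` would insert instead — exact on Pre_imbalance, which excludes exactly those inputs.
def recuperergrapheentrantsortant (flux : List (Int × List (Int × Int))) :
    PySem.Dict Int (List Int × List Int) :=
  let graphe := (pvKeys flux).foldl (fun g i => g.insert i ([], [])) PySem.Dict.empty
  (pvKeys flux).foldl (fun g i =>
    (pvRowKeys flux i).foldl (fun g j =>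
      let g := g.modify j ([], []) (fun p => (p.1 ++ [i], p.2))
      g.modify i ([], []) (fun p => (p.1, p.2 ++ [j]))) g) graphe

def imbalance (flux : List (Int × List (Int × Int))) (m : Int) (depart : Int) (arrivee : Int) : List (Int × Int) :=
  let graphe := pvInit flux m depart arrivee
  let ges := recuperergrapheentrantsortant flux
  ((pvKeys flux).foldl (fun g i =>
    let es := ges.getD i ([], [])          -- grapheentrantsortant[i]: i is always a key
    let sommeentranti := es.1.foldl (fun s k => s + pvVal flux k i) 0
    let sommesortanti := es.2.foldl (fun s j => s + pvVal flux i j) 0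
    g.insert i (g.getD i 0 + sommeentranti - sommesortanti)) graphe).items

-- ===== PORT B =====
-- Same KeyError note: Python's `graphe[j] = graphe[j] + f` raises when j is not a node;
-- the port's insert/getD is exact on Pre_imbalance.
def imbalance_alt (flux : List (Int × List (Int × Int))) (m : Int) (depart : Int) (arrivee : Int) : List (Int × Int) :=
  let graphe := pvInit flux m depart arrivee
  ((pvKeys flux).foldl (fun g i =>
    (pvRowKeys flux i).foldl (fun g j =>
      let f := pvVal flux i j
      let g := g.insert i (g.getD i 0 - f)
      g.insert j (g.getD j 0 + f)) g) graphe).items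

-- ===== PRECONDITION & SPEC =====
-- Pre_ excludes exactly the inputs on which some edge points to a node that is not a key of
-- flux: there both Pythons raise KeyError.
def Pre_imbalance (flux : List (Int × List (Int × Int))) (m : Int) (depart : Int) (arrivee : Int) : Prop :=
  ∀ i ∈ pvKeys flux, ∀ j ∈ pvRowKeys flux i, j ∈ pvKeys flux
instance (flux : List (Int × List (Int × Int))) (m : Int) (depart : Int) (arrivee : Int) : Decidable (Pre_imbalance flux m depart arrivee) := by unfold Pre_imbalance; infer_instance

def pvWitness_imbalance : (List (Int × List (Int × Int))) × Int × Int × Int :=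
  ([(0, [(1, 3)]), (1, [])], 5, 0, 1)

def Spec_imbalance (flux : List (Int × List (Int × Int))) (m : Int) (depart : Int) (arrivee : Int) (out : List (Int × Int)) : Prop := out = imbalance_alt flux m depart arrivee
instance (flux : List (Int × List (Int × Int))) (m : Int) (depart : Int) (arrivee : Int) (out : List (Int × Int)) : Decidable (Spec_imbalance flux m depart arrivee out) := by unfold Spec_imbalance; infer_instance

-- ===== CLAIM (what is proved, stated in full; the proofs are below) =====
def Claim_equal_imbalance : Prop := ∀ (flux : List (Int × List (Int × Int))) (m : Int) (depart : Int) (arrivee : Int), Dom_imbalance flux m depart arrivee → Pre_imbalance flux m depart arrivee → Spec_imbalance flux m depart arrivee (imbalance flux m depart arrivee)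

-- ===== LEMMAS AND PROOFS =====

-- The flattened edge list both double loops walk, in the same order.
def pvEdges (flux : List (Int × List (Int × Int))) : List (Int × Int) :=
  (pvKeys flux).flatMap (fun i => (pvRowKeys flux i).map (fun j => (i, j)))

-- a nested "for i in l: for j in h i: g = step g i j" is the fold over the flattened pair list
theorem pv_foldl_foldl_flatMap {α β γ : Type} (l : List α) (h : α → List β)
    (step : γ → α → β → γ) (g : γ) :
    l.foldl (fun g i => (h i).foldl (fun g j => step g i j) g) g
      = (l.flatMap (fun i => (h i).map (fun j => (i, j)))).foldl (fun g e => step g e.1 e.2) g := by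
  induction l generalizing g with
  | nil => rfl
  | cons x t ih => simp [List.flatMap_cons, List.foldl_append, List.foldl_map, ih]

-- fold of inserts whose value depends on the key only
theorem pv_getD_foldl_insertV {ν : Type} (V : Int → ν) (d0 : ν) :
    ∀ (l : List Int) (g : PySem.Dict Int ν) (k : Int),
      (l.foldl (fun g i => g.insert i (V i)) g).getD k d0
        = if k ∈ l then V k else g.getD k d0 := by
  intro l
  induction l with
  | nil => simp
  | cons x t ih =>
    intro g k
    by_cases hk : k ∈ t
    · simp [List.foldl_cons, ih, hk]
    · by_cases hx : k = x <;>
        simp [List.foldl_cons, ih, hk, hx, PySem.Dict.getD_insert]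

-- fold of self-reading inserts over a Nodup key list
theorem pv_getD_foldl_insertF (F : Int → Int → Int) :
    ∀ (l : List Int) (g : PySem.Dict Int Int) (k : Int), l.Nodup →
      (l.foldl (fun g i => g.insert i (F (g.getD i 0) i)) g).getD k 0
        = if k ∈ l then F (g.getD k 0) k else g.getD k 0 := by
  intro l
  induction l with
  | nil => simp
  | cons x t ih =>
    intro g k hnd
    rcases List.nodup_cons.mp hnd with ⟨hx, ht⟩
    by_cases hkx : k = x
    · subst hkx
      have : k ∉ t := hx
      simp [List.foldl_cons, ih _ _ ht, this]
    · simp [List.foldl_cons, ih _ _ ht, hkx, PySem.Dict.getD_insert]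

-- the scatter fold of B over the edge list: value at any key
theorem pv_scatter_getD (flux : List (Int × List (Int × Int))) :
    ∀ (E : List (Int × Int)) (g : PySem.Dict Int Int) (k : Int),
      (E.foldl (fun g e =>
          (g.insert e.1 (g.getD e.1 0 - pvVal flux e.1 e.2)).insert e.2
            ((g.insert e.1 (g.getD e.1 0 - pvVal flux e.1 e.2)).getD e.2 0 + pvVal flux e.1 e.2)) g).getD k 0
        = g.getD k 0 +
            ((E.map (fun e => if k = e.2 then pvVal flux e.1 e.2 else 0)).sum
              - (E.map (fun e => if k = e.1 then pvVal flux e.1 e.2 else 0)).sum) := by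
  intro E
  induction E with
  | nil => simp
  | cons e t ih =>
    intro g k
    obtain ⟨a, b⟩ := e
    rw [List.foldl_cons, ih]
    simp only [PySem.Dict.getD_insert]
    by_cases h2 : k = b <;> by_cases h1 : k = a
    · cases h1; cases h2; simp; try ring
    · cases h2
      simp [h1]; try ring
    · cases h1
      simp [h2]; try ring
    · simp [h1, h2]; try ring

-- the scatter fold preserves the key set when every endpoint is already a key
theorem pv_scatter_keys (flux : List (Int × List (Int × Int))) :
    ∀ (E : List (Int × Int)) (g : PySem.Dict Int Int),
      (∀ e ∈ E, e.1 ∈ g.keys ∧ e.2 ∈ g.keys) →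
      (E.foldl (fun g e =>
          (g.insert e.1 (g.getD e.1 0 - pvVal flux e.1 e.2)).insert e.2
            ((g.insert e.1 (g.getD e.1 0 - pvVal flux e.1 e.2)).getD e.2 0 + pvVal flux e.1 e.2)) g).keys = g.keys := by
  intro E
  induction E with
  | nil => intro g _; rfl
  | cons e t ih =>
    intro g hE
    have h1 : e.1 ∈ g.keys := (hE e (by simp)).1
    have h2 : e.2 ∈ g.keys := (hE e (by simp)).2
    have k1 : ((g.insert e.1 (g.getD e.1 0 - pvVal flux e.1 e.2))).keys = g.keys :=
      PySem.Dict.keys_insert_of_contains _ _ ((PySem.Dict.contains_iff_mem_keys _ _).mpr h1)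
    have k2 : (((g.insert e.1 (g.getD e.1 0 - pvVal flux e.1 e.2))).insert e.2
        (((g.insert e.1 (g.getD e.1 0 - pvVal flux e.1 e.2))).getD e.2 0 + pvVal flux e.1 e.2)).keys
        = g.keys := by
      rw [PySem.Dict.keys_insert_of_contains _ _
        ((PySem.Dict.contains_iff_mem_keys _ _).mpr (k1 ▸ h2)), k1]
    rw [List.foldl_cons]
    rw [ih _ (by intro e' he'; rw [k2]; exact hE e' (by simp [he']))]
    exact k2

-- the helper's modify fold over the edge list: entrant/sortant lists at any key
theorem pv_helper_getD (flux : List (Int × List (Int × Int))) :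
    ∀ (E : List (Int × Int)) (g : PySem.Dict Int (List Int × List Int)) (k : Int),
      (E.foldl (fun g e =>
          (g.modify e.2 ([], []) (fun p => (p.1 ++ [e.1], p.2))).modify e.1 ([], [])
            (fun p => (p.1, p.2 ++ [e.2]))) g).getD k ([], [])
        = ((g.getD k ([], [])).1 ++ (E.filter (fun e => e.2 == k)).map (·.1),
           (g.getD k ([], [])).2 ++ (E.filter (fun e => e.1 == k)).map (·.2)) := by
  intro E
  induction E with
  | nil => simp
  | cons e t ih =>
    intro g k
    obtain ⟨a, b⟩ := e
    rw [List.foldl_cons, ih]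
    simp only [PySem.Dict.getD_modify]
    by_cases h2 : k = b <;> by_cases h1 : k = a
    · cases h1; cases h2; simp
    · cases h2
      have h1' : ¬ a = k := fun h => h1 h.symm
      simp [h1, h1']
    · cases h1
      have h2' : ¬ b = k := fun h => h2 h.symm
      simp [h2, h2']
    · have h2' : ¬ b = k := fun h => h2 h.symm
      have h1' : ¬ a = k := fun h => h1 h.symm
      simp [h1, h2, h1', h2']

-- indicator sum = sum over the filtered list
theorem pv_sum_ite_filter {α : Type} (p : α → Prop) [DecidablePred p] (v : α → Int) :
    ∀ (E : List α),
      (E.map (fun e => if p e then v e else 0)).sum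
        = ((E.filter (fun e => decide (p e))).map v).sum := by
  intro E
  induction E with
  | nil => rfl
  | cons e t ih =>
    by_cases h : p e <;> simp [h, ih]

-- Set.update is the identity on a superset
theorem pv_set_update_of_subset {S : List Int} :
    ∀ (l : List Int), (∀ x ∈ l, x ∈ S) → PySem.Set.update S l = S := by
  intro l
  induction l generalizing S with
  | nil => intro _; rfl
  | cons x t ih =>
    intro h
    have hx : PySem.Set.add S x = S := PySem.Set.add_of_mem (h x (by simp))
    have : PySem.Set.update S (x :: t) = PySem.Set.update (PySem.Set.add S x) t := rfl
    rw [this, hx, ih (fun y hy => h y (by simp [hy]))]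

theorem pv_keys_init (flux : List (Int × List (Int × Int))) (m depart arrivee : Int) :
    (pvInit flux m depart arrivee).keys = pvKeys flux := by
  unfold pvInit
  rw [PySem.List.foldl_congr_mem _ _
    (fun (g : PySem.Dict Int Int) i =>
      g.insert i (if i = arrivee then -m else if i = depart then m else 0)) _
    (by intro acc x _; simp only []; split_ifs <;> rfl)]
  rw [PySem.Dict.keys_foldl_insert (pvKeys flux)
    (fun _ i => if i = arrivee then -m else if i = depart then m else 0) PySem.Dict.empty]
  rw [show (PySem.Dict.empty : PySem.Dict Int Int).keys = [] from rfl,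
    PySem.Set.update_nil_left]
  exact PySem.Set.ofList_eq_self_of_nodup _ (PySem.List.nodup_dedup _)

theorem pv_getD_init (flux : List (Int × List (Int × Int))) (m depart arrivee : Int) (k : Int) :
    (pvInit flux m depart arrivee).getD k 0
      = if k ∈ pvKeys flux then (if k = arrivee then -m else if k = depart then m else 0)
        else 0 := by
  unfold pvInit
  rw [PySem.List.foldl_congr_mem _ _
    (fun (g : PySem.Dict Int Int) i =>
      g.insert i (if i = arrivee then -m else if i = depart then m else 0)) _
    (by intro acc x _; simp only []; split_ifs <;> rfl)]
  rw [pv_getD_foldl_insertV (fun i => if i = arrivee then -m else if i = depart then m else 0) 0]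
  simp [PySem.Dict.getD_empty]

-- the normal form both ports are reduced to
def pvOut (flux : List (Int × List (Int × Int))) (m depart arrivee : Int) : List (Int × Int) :=
  (pvKeys flux).map (fun k =>
    (k, (if k = arrivee then -m else if k = depart then m else 0)
        + (((pvEdges flux).filter (fun e => e.2 == k)).map (fun e => pvVal flux e.1 e.2)).sum
        - (((pvEdges flux).filter (fun e => e.1 == k)).map (fun e => pvVal flux e.1 e.2)).sum))

theorem pv_alt_eq (flux : List (Int × List (Int × Int))) (m depart arrivee : Int)
    (hPre : Pre_imbalance flux m depart arrivee) :
    imbalance_alt flux m depart arrivee = pvOut flux m depart arrivee := by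
  have hflat : imbalance_alt flux m depart arrivee
      = ((pvEdges flux).foldl
          (fun g e => (g.insert e.1 (g.getD e.1 0 - pvVal flux e.1 e.2)).insert e.2
              ((g.insert e.1 (g.getD e.1 0 - pvVal flux e.1 e.2)).getD e.2 0 + pvVal flux e.1 e.2))
          (pvInit flux m depart arrivee)).items :=
    congrArg PySem.Dict.items
      (pv_foldl_foldl_flatMap (pvKeys flux) (pvRowKeys flux)
        (fun g i j => (g.insert i (g.getD i 0 - pvVal flux i j)).insert j
            ((g.insert i (g.getD i 0 - pvVal flux i j)).getD j 0 + pvVal flux i j))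
        (pvInit flux m depart arrivee))
  rw [hflat]
  have hmem : ∀ e ∈ pvEdges flux,
      e.1 ∈ (pvInit flux m depart arrivee).keys ∧ e.2 ∈ (pvInit flux m depart arrivee).keys := by
    intro e he
    rw [pv_keys_init]
    rcases List.mem_flatMap.mp he with ⟨i, hi, hmapped⟩
    rcases List.mem_map.mp hmapped with ⟨j, hj, rfl⟩
    exact ⟨hi, hPre i hi j hj⟩
  have hkeys := pv_scatter_keys flux (pvEdges flux) (pvInit flux m depart arrivee) hmem
  rw [PySem.Dict.items_eq_map_keys _
    (by rw [hkeys, pv_keys_init]; exact PySem.List.nodup_dedup _) 0]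
  rw [hkeys, pv_keys_init]
  unfold pvOut
  apply List.map_congr_left
  intro k hk
  rw [pv_scatter_getD flux (pvEdges flux) (pvInit flux m depart arrivee) k,
    pv_getD_init, if_pos hk,
    pv_sum_ite_filter (fun e => k = e.2) (fun e => pvVal flux e.1 e.2) (pvEdges flux),
    pv_sum_ite_filter (fun e => k = e.1) (fun e => pvVal flux e.1 e.2) (pvEdges flux)]
  have hp2 : (fun (e : Int × Int) => decide (k = e.2)) = (fun e => e.2 == k) := by
    funext e
    by_cases h : k = e.2
    · simp [h]
    · have h' : ¬ e.2 = k := fun hh => h hh.symm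
      simp [h, h']
  have hp1 : (fun (e : Int × Int) => decide (k = e.1)) = (fun e => e.1 == k) := by
    funext e
    by_cases h : k = e.1
    · simp [h]
    · have h' : ¬ e.1 = k := fun hh => h hh.symm
      simp [h, h']
  rw [hp2, hp1]
  simp only [Prod.mk.injEq, true_and]
  ring

theorem pv_a_eq (flux : List (Int × List (Int × Int))) (m depart arrivee : Int) :
    imbalance flux m depart arrivee = pvOut flux m depart arrivee := by
  have hges : ∀ k, (recuperergrapheentrantsortant flux).getD k ([], [])
      = (((pvEdges flux).filter (fun e => e.2 == k)).map (·.1),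
         ((pvEdges flux).filter (fun e => e.1 == k)).map (·.2)) := by
    intro k
    have hflat : recuperergrapheentrantsortant flux
        = (pvEdges flux).foldl
            (fun g e => (g.modify e.2 ([], []) (fun p => (p.1 ++ [e.1], p.2))).modify e.1 ([], [])
              (fun p => (p.1, p.2 ++ [e.2])))
            ((pvKeys flux).foldl
              (fun g i => g.insert i (([], []) : List Int × List Int)) PySem.Dict.empty) := by
      unfold recuperergrapheentrantsortant
      exact pv_foldl_foldl_flatMap (pvKeys flux) (pvRowKeys flux)
        (fun (g : PySem.Dict Int (List Int × List Int)) i j =>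
          (g.modify j ([], []) (fun p => (p.1 ++ [i], p.2))).modify i ([], [])
            (fun p => (p.1, p.2 ++ [j])))
        ((pvKeys flux).foldl
          (fun g i => g.insert i (([], []) : List Int × List Int)) PySem.Dict.empty)
    rw [hflat, pv_helper_getD flux,
      pv_getD_foldl_insertV (fun _ => (([], []) : List Int × List Int)) ([], [])]
    simp [PySem.Dict.getD_empty]
  have hmain : imbalance flux m depart arrivee
      = ((pvKeys flux).foldl (fun g i => g.insert i
          ((fun c i => c
            + (((recuperergrapheentrantsortant flux).getD i ([], [])).1.foldl
                (fun s x => s + pvVal flux x i) 0)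
            - (((recuperergrapheentrantsortant flux).getD i ([], [])).2.foldl
                (fun s j => s + pvVal flux i j) 0)) (g.getD i 0) i))
          (pvInit flux m depart arrivee)).items := rfl
  rw [hmain]
  have hkeys : ((pvKeys flux).foldl (fun g i => g.insert i
          ((fun c i => c
            + (((recuperergrapheentrantsortant flux).getD i ([], [])).1.foldl
                (fun s x => s + pvVal flux x i) 0)
            - (((recuperergrapheentrantsortant flux).getD i ([], [])).2.foldl
                (fun s j => s + pvVal flux i j) 0)) (g.getD i 0) i))
          (pvInit flux m depart arrivee)).keys = pvKeys flux := by
    rw [PySem.Dict.keys_foldl_insert, pv_keys_init,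
      pv_set_update_of_subset _ (fun x hx => hx)]
  rw [PySem.Dict.items_eq_map_keys _
    (by rw [hkeys]; exact PySem.List.nodup_dedup _) 0]
  rw [hkeys]
  unfold pvOut
  apply List.map_congr_left
  intro k hk
  have hv := pv_getD_foldl_insertF
    (fun c i => c
      + (((recuperergrapheentrantsortant flux).getD i ([], [])).1.foldl
          (fun s x => s + pvVal flux x i) 0)
      - (((recuperergrapheentrantsortant flux).getD i ([], [])).2.foldl
          (fun s j => s + pvVal flux i j) 0))
    (pvKeys flux) (pvInit flux m depart arrivee) k (PySem.List.nodup_dedup _)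
  rw [hv, if_pos hk, pv_getD_init, if_pos hk]
  beta_reduce
  rw [hges k]
  simp only [PySem.List.foldl_add, List.map_map, Prod.mk.injEq, true_and]
  have hL : ((pvEdges flux).filter (fun e => e.2 == k)).map
        ((fun x => pvVal flux x k) ∘ fun (x : Int × Int) => x.1)
      = ((pvEdges flux).filter (fun e => e.2 == k)).map (fun e => pvVal flux e.1 e.2) :=
    List.map_congr_left (by
      intro e he
      have hek : e.2 = k := by simpa using (List.mem_filter.mp he).2
      simp [Function.comp, hek])
  have hR : ((pvEdges flux).filter (fun e => e.1 == k)).map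
        (pvVal flux k ∘ fun (x : Int × Int) => x.2)
      = ((pvEdges flux).filter (fun e => e.1 == k)).map (fun e => pvVal flux e.1 e.2) :=
    List.map_congr_left (by
      intro e he
      have hek : e.1 = k := by simpa using (List.mem_filter.mp he).2
      simp [Function.comp, hek])
  rw [hL, hR]
  ring

-- ===== VERDICT (by name: the statement is the Claim_ definition above) =====
theorem imbalance_spec : Claim_equal_imbalance := by
  intro flux m depart arrivee _hD hPre
  unfold Spec_imbalance
  rw [pv_a_eq flux m depart arrivee, pv_alt_eq flux m depart arrivee hPre]
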